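-- pv_equiv track=rewrite | github.com/adomkwabena/SSD1322_OLED_Driver | Python Scripts/ssd1322_resource_utility.py | add_dummy_data
-- ===== SOURCE A (Python) =====
-- def add_dummy_data(bitmap, width, height):
--     """
--     Adds dummy data to a bitmap to ensure the width is divisible by 4.
--     This is required because the SSD1322 OLED driver maintains a single column
--     address for four pixels.
--
--     bitmap (list): A list of integers (pixel values)
--     width (int): The width of the bitmap
--     height (int): The height of the bitmap
--
--     Returns (tuple): A tuple which contains modified image data.
--                      |
--                      |--> bitmap_data (tuple)
--                      |    |--> bitmap pixel array (list)
--                      |    |--> bitmap width  (int)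
--                      |    \--> bitmap height (int)
--                      |
--                      \--> dummy_to_add (int): Columns of dummy data added
--     """
--     output = []
--     bitmap_data = tuple()
--     # Maximum dummy data should be 3
--     dummy_to_add = (4 - (width % 4)) % 4
--
--     new_width = width + dummy_to_add
--
--     if dummy_to_add > 0:
--         index = 0
--         for i in range(height):
--             for j in range(new_width):
--                 # Add dummy data beyond original width
--                 if j > (width - 1):
--                     output.append(0)
--                 else:
--                     output.append(bitmap[index])
--                     index += 1
--         bitmap_data = (output, new_width, height)
--     else:
--         bitmap_data = (bitmap, width, height)
--
--     return (bitmap_data, dummy_to_add)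
-- ===== SOURCE B (Python) =====
-- def add_dummy_data(bitmap, width, height):
--     dummy_to_add = (4 - (width % 4)) % 4
--     if dummy_to_add == 0:
--         return ((bitmap, width, height), 0)
--     pad = [0] * dummy_to_add
--     output = []
--     for i in range(height):
--         output += bitmap[i * width:(i + 1) * width] + pad
--     return ((output, width + dummy_to_add, height), dummy_to_add)
-- ===== Notes on version B (the rewrite author's own statement) =====
-- stated objective: simpler
-- what changed: Replaces A's nested per-pixel loop with a threaded index by a single per-row pass that slices each width-long row from the flat bitmap and appends a precomputed zero pad (early return when width is already divisible by 4).
-- outside the precondition, e.g. on add_dummy_data([1, 2], -1, 1): A returns (([], 0, 1), 1), B returns (([1, 0], 0, 1), 1)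
import Mathlib
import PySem

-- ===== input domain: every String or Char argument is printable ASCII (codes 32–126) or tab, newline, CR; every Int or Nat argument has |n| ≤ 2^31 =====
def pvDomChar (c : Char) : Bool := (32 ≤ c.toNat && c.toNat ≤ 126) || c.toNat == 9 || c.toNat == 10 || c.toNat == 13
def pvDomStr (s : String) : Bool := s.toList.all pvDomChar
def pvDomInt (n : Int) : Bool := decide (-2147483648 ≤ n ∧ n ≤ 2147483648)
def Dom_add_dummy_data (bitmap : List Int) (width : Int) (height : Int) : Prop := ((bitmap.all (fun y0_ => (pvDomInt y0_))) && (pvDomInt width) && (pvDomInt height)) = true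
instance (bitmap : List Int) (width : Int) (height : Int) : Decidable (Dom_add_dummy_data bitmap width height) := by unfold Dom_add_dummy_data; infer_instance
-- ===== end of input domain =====

-- B replaces A's nested per-pixel loop (with a threaded read index) by one per-row pass
-- that slices each width-long row from the flat bitmap and appends a precomputed zero pad
-- (objective: simpler).

-- ===== PORT A =====
-- inner loop body: 'if j > (width - 1): output.append(0) else: output.append(bitmap[index]); index += 1'
-- bitmap[index] is ported with pyGetD (total); Pre_ guarantees the index is in range wherever A returns.
def pvInnerStep (bitmap : List Int) (width : Int) (st : List Int × Int) (j : Int) : List Int × Int :=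
  if j > width - 1 then (st.1 ++ [(0 : Int)], st.2)
  else (st.1 ++ [PySem.List.pyGetD bitmap st.2 0], st.2 + 1)

-- outer loop body: 'for j in range(new_width): …' (the row index i is unused by the body)
def pvOuterStep (bitmap : List Int) (width new_width : Int) (st : List Int × Int) (_i : Int) : List Int × Int :=
  (PySem.List.pyRange 0 new_width 1).foldl (pvInnerStep bitmap width) st

def add_dummy_data (bitmap : List Int) (width : Int) (height : Int) : (List Int × Int × Int) × Int :=
  let dummy_to_add := PySem.Int.mod (4 - PySem.Int.mod width 4) 4
  let new_width := width + dummy_to_add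
  if dummy_to_add > 0 then
    let st := (PySem.List.pyRange 0 height 1).foldl (pvOuterStep bitmap width new_width) ([], 0)
    ((st.1, new_width, height), dummy_to_add)
  else
    ((bitmap, width, height), dummy_to_add)

-- ===== PORT B =====
def add_dummy_data_alt (bitmap : List Int) (width : Int) (height : Int) : (List Int × Int × Int) × Int :=
  let dummy_to_add := PySem.Int.mod (4 - PySem.Int.mod width 4) 4
  if dummy_to_add = 0 then
    ((bitmap, width, height), 0)
  else
    let pad := PySem.List.pyRepeat [(0 : Int)] dummy_to_add
    let output := (PySem.List.pyRange 0 height 1).foldl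
      (fun acc i => acc ++ (PySem.List.slice bitmap (some (i * width)) (some ((i + 1) * width)) ++ pad)) []
    ((output, width + dummy_to_add, height), dummy_to_add)

-- ===== PRECONDITION & SPEC =====
-- When padding is needed (width % 4 ≠ 0) and at least one row is built (height > 0), Pre_ excludes
-- (a) negative widths — outside the task's natural bitmap domain: A then emits empty rows while B's
-- slices use Python's negative-bound rule — and (b) bitmaps shorter than width*height, on which A
-- raises IndexError (B's slicing silently truncates).
def Pre_add_dummy_data (bitmap : List Int) (width : Int) (height : Int) : Prop :=
  PySem.Int.mod width 4 = 0 ∨ height ≤ 0 ∨ (0 ≤ width ∧ width * height ≤ (bitmap.length : Int))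
instance (bitmap : List Int) (width : Int) (height : Int) : Decidable (Pre_add_dummy_data bitmap width height) := by unfold Pre_add_dummy_data; infer_instance

def pvWitness_add_dummy_data : List Int × Int × Int := ([1, 2, 3, 1, 2, 3], 3, 2)

def Spec_add_dummy_data (bitmap : List Int) (width : Int) (height : Int) (out : (List Int × Int × Int) × Int) : Prop := out = add_dummy_data_alt bitmap width height
instance (bitmap : List Int) (width : Int) (height : Int) (out : (List Int × Int × Int) × Int) : Decidable (Spec_add_dummy_data bitmap width height out) := by unfold Spec_add_dummy_data; infer_instance

-- ===== CLAIM (what is proved, stated in full; the proofs are below) =====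
def Claim_equal_add_dummy_data : Prop := ∀ (bitmap : List Int) (width : Int) (height : Int), Dom_add_dummy_data bitmap width height → Pre_add_dummy_data bitmap width height → Spec_add_dummy_data bitmap width height (add_dummy_data bitmap width height)

-- ===== LEMMAS AND PROOFS =====

-- a map of getD over consecutive indices is a drop/take segment (in range)
lemma pv_map_getD_eq_take_drop (xs : List Int) (k n : Nat) (h : k + n ≤ xs.length) :
    (List.range n).map (fun t => xs.getD (k + t) 0) = (xs.drop k).take n := by
  apply List.ext_getElem
  · simp; omega
  · intro i h1 h2
    simp only [List.getElem_map, List.getElem_range, List.getElem_take, List.getElem_drop]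
    rw [List.getD_eq_getElem xs 0 (by simp at h1 ⊢; omega)]

-- the inner loop over the first n < width column indices copies pixels and advances the read index
lemma pv_inner_lo (bitmap : List Int) (width : Int) (n : Nat) :
    ∀ (acc : List Int) (k : Nat), (n : Int) ≤ width →
    (PySem.List.pyRange 0 (n : Int) 1).foldl (pvInnerStep bitmap width) (acc, (k : Int))
      = (acc ++ (List.range n).map (fun t => bitmap.getD (k + t) 0), ((k + n : Nat) : Int)) := by
  induction n with
  | zero =>
    intro acc k _
    rw [PySem.List.pyRange_one_eq_nil (by simp)]
    simp
  | succ m ih =>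
    intro acc k h
    have hc : ((m + 1 : Nat) : Int) = (m : Int) + 1 := by push_cast; ring
    rw [hc, PySem.List.pyRange_one_succ_right (by positivity), List.foldl_append,
        ih acc k (by omega)]
    simp only [List.foldl_cons, List.foldl_nil, pvInnerStep]
    rw [if_neg (by omega)]
    rw [PySem.List.pyGetD_natCast]
    rw [List.range_succ, List.map_append]
    simp only [List.map_cons, List.map_nil, List.append_assoc, Prod.mk.injEq, true_and]
    push_cast
    ring

-- the inner loop over the n column indices at or beyond width appends zeros, read index unchanged
lemma pv_inner_hi (bitmap : List Int) (width : Int) (n : Nat) :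
    ∀ (st : List Int × Int),
    (PySem.List.pyRange width (width + (n : Int)) 1).foldl (pvInnerStep bitmap width) st
      = (st.1 ++ List.replicate n 0, st.2) := by
  induction n with
  | zero =>
    intro st
    rw [PySem.List.pyRange_one_eq_nil (by simp)]
    simp
  | succ m ih =>
    intro st
    have hc : width + ((m + 1 : Nat) : Int) = (width + (m : Int)) + 1 := by push_cast; ring
    rw [hc, PySem.List.pyRange_one_succ_right (by omega), List.foldl_append, ih st]
    simp only [List.foldl_cons, List.foldl_nil, pvInnerStep]
    rw [if_pos (by omega)]
    rw [List.replicate_succ', ← List.append_assoc]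

-- one full row of A's inner loop = the corresponding width-long segment of B plus the zero pad
lemma pv_row (bitmap : List Int) (width d : Int) (acc : List Int) (k : Nat)
    (hw : 0 ≤ width) (hd : 0 ≤ d) (hlen : k + width.toNat ≤ bitmap.length) :
    (PySem.List.pyRange 0 (width + d) 1).foldl (pvInnerStep bitmap width) (acc, (k : Int))
      = (acc ++ ((bitmap.drop k).take width.toNat ++ List.replicate d.toNat 0), ((k + width.toNat : Nat) : Int)) := by
  rw [PySem.List.pyRange_one_append 0 width (width + d) hw (by omega), List.foldl_append]
  have e1 : PySem.List.pyRange 0 width 1 = PySem.List.pyRange 0 ((width.toNat : Nat) : Int) 1 := by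
    rw [Int.toNat_of_nonneg hw]
  have e2 : PySem.List.pyRange width (width + d) 1
      = PySem.List.pyRange width (width + ((d.toNat : Nat) : Int)) 1 := by
    rw [Int.toNat_of_nonneg hd]
  rw [e1, pv_inner_lo bitmap width width.toNat acc k (by omega)]
  rw [e2, pv_inner_hi bitmap width d.toNat]
  rw [pv_map_getD_eq_take_drop bitmap k width.toNat hlen]
  simp [List.append_assoc]

-- the outer loop over the first m rows, starting at read index 0
lemma pv_outer (bitmap : List Int) (width d : Int) (hw : 0 ≤ width) (hd : 0 ≤ d) (m : Nat)
    (hlen : m * width.toNat ≤ bitmap.length) :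
    ((List.range m).map (fun (t : Nat) => (t : Int))).foldl (pvOuterStep bitmap width (width + d)) ([], 0)
      = ((List.range m).flatMap (fun i => (bitmap.drop (i * width.toNat)).take width.toNat ++ List.replicate d.toNat 0),
          ((m * width.toNat : Nat) : Int)) := by
  induction m with
  | zero => simp
  | succ p ih =>
    rw [List.range_succ, List.map_append, List.foldl_append,
        ih (le_trans (Nat.mul_le_mul_right _ (Nat.le_succ p)) hlen)]
    simp only [List.map_cons, List.map_nil, List.foldl_cons, List.foldl_nil, pvOuterStep]
    rw [pv_row bitmap width d _ (p * width.toNat) hw hd (by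
      have := hlen; rw [Nat.succ_mul] at this; omega)]
    rw [List.flatMap_append]
    simp [Nat.succ_mul]

-- B's per-row slice equals the drop/take segment (nonnegative width)
lemma pv_slice_row (bitmap : List Int) (width : Int) (hw : 0 ≤ width) (i : Nat) :
    PySem.List.slice bitmap (some ((i : Int) * width)) (some (((i : Int) + 1) * width))
      = (bitmap.drop (i * width.toNat)).take width.toNat := by
  have h1 : (i : Int) * width = ((i * width.toNat : Nat) : Int) := by
    push_cast; rw [Int.toNat_of_nonneg hw]
  have h2 : ((i : Int) + 1) * width = ((i * width.toNat : Nat) : Int) + ((width.toNat : Nat) : Int) := by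
    push_cast; rw [Int.toNat_of_nonneg hw]; ring
  rw [h1, h2, PySem.List.slice_natCast_add]

-- ===== VERDICT (by name: the statement is the Claim_ definition above) =====
theorem add_dummy_data_spec : Claim_equal_add_dummy_data := by
  intro bitmap width height _ hpre
  unfold Spec_add_dummy_data add_dummy_data add_dummy_data_alt
  set d := PySem.Int.mod (4 - PySem.Int.mod width 4) 4 with hd
  have hmod : PySem.Int.mod width 4 = width % 4 := PySem.Int.mod_eq_emod_of_pos (by omega)
  have hdval : d = (4 - width % 4) % 4 := by
    rw [hd, hmod, PySem.Int.mod_eq_emod_of_pos (by omega)]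
  have hd0 : 0 ≤ d := by rw [hdval]; omega
  by_cases hz : d = 0
  · rw [if_neg (by omega), if_pos hz, hz]
  · have hdpos : 0 < d := lt_of_le_of_ne hd0 (Ne.symm hz)
    have hmodne : width % 4 ≠ 0 := by
      intro h; apply hz; rw [hdval, h]; rfl
    rw [if_pos hdpos, if_neg hz]
    rcases hpre with h | hh | h
    · exact absurd (hmod ▸ h) hmodne
    · -- height ≤ 0: both loops run over an empty range
      rw [PySem.List.pyRange_one_eq_nil (by omega)]
      simp
    · obtain ⟨hw, hlen⟩ := h
      have hr : PySem.List.pyRange 0 height 1 = (List.range height.toNat).map (fun (t : Nat) => (t : Int)) := by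
        rw [PySem.List.pyRange_one]; simp
      have hmw : height.toNat * width.toNat ≤ bitmap.length := by
        by_cases hh : height ≤ 0
        · simp [Int.toNat_of_nonpos hh]
        · push Not at hh
          have : (height.toNat : Int) * (width.toNat : Int) ≤ (bitmap.length : Int) := by
            rw [Int.toNat_of_nonneg (le_of_lt hh), Int.toNat_of_nonneg hw]
            calc (height : Int) * width = width * height := by ring
              _ ≤ _ := hlen
          exact_mod_cast this
      rw [hr, pv_outer bitmap width d hw hd0 height.toNat hmw]
      simp only [PySem.List.foldl_append_eq_flatMap, List.flatMap_map,
        PySem.List.pyRepeat_singleton, List.nil_append]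
      have hfun : (fun i : Nat =>
            PySem.List.slice bitmap (some ((i : Int) * width)) (some (((i : Int) + 1) * width))
              ++ List.replicate d.toNat 0)
          = (fun i : Nat => (bitmap.drop (i * width.toNat)).take width.toNat ++ List.replicate d.toNat 0) := by
        funext i
        rw [pv_slice_row bitmap width hw i]
      rw [hfun]
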